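-- pv_equiv track=rewrite | github.com/sumtuckyi/algorithm.py_mac | traversing.py | cal_abs
-- ===== SOURCE A (Python) =====
-- def cal_abs(new_list):
--
--     dx = [-1, 1, 0, 0]  # 상하좌우
--     dy = [0, 0, -1, 1]
--
--     max_v = 0
--     result = 0
--     for i in range(5):
--         for j in range(5):
--             direction = 0
--             total = 0
--             while direction < 4:  # 4방향에 대해 각 한 번 씩만 탐색할 것
--                 y, x = j, i  # 기준점
--                 current = new_list[j][i]  # 기준점의 값
--                 y, x = y+dy[direction], x+dx[direction]
--                 if 0 <= y <= 4 and 0 <= x <= 4 :  # 유효한 인덱스인지 검사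
--                     total += abs(current - new_list[y][x])
--                     direction += 1
--                 else:
--                     direction += 1
--             result += total
--             if max_v < total:
--                 max_v = total
--     return result
-- ===== SOURCE B (Python) =====
-- def cal_abs(new_list):
--     # Sum |difference| over each unique adjacent pair once, then double:
--     # A counts every neighbor pair from both ends, so this is equal.
--     s = 0
--     for j in range(5):
--         for i in range(4):
--             s += abs(new_list[j][i] - new_list[j][i + 1])
--             s += abs(new_list[i][j] - new_list[i + 1][j])
--     return 2 * s
-- ===== Notes on version B (the rewrite author's own statement) =====
-- stated objective: simpler
-- what changed: B sums each unique horizontal/vertical edge of the 5x5 grid once and doubles the total, replacing A's per-cell 4-direction while-loop with bounds checks (and dropping the unused max_v).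
import Mathlib
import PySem

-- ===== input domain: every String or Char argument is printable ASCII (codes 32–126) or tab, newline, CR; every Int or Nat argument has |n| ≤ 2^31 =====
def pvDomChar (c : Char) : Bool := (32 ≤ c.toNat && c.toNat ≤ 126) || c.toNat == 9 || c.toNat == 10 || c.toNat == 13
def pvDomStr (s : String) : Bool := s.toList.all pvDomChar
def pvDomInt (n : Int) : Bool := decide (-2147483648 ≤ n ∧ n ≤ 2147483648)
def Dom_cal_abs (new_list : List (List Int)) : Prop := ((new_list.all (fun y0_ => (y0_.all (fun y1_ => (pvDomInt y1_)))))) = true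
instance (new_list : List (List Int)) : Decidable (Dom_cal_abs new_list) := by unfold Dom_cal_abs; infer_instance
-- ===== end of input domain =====

-- B sums each unique horizontal/vertical edge of the 5x5 grid once and doubles the total,
-- replacing A's per-cell four-direction neighbor scan (and dropping A's unused max_v).

-- two-level indexing new_list[y][x]; out of range gives 0 here (Python raises there:
-- exactly those inputs are excluded by Pre_cal_abs)
def pvGet2 (m : List (List Int)) (y x : Int) : Int :=
  (PySem.List.pyGet? ((PySem.List.pyGet? m y).getD []) x).getD 0

-- ===== PORT A =====
def cal_abs (new_list : List (List Int)) : Int :=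
  let dx : List Int := [-1, 1, 0, 0]
  let dy : List Int := [0, 0, -1, 1]
  -- state (max_v, result); the while-loop runs direction = 0, 1, 2, 3
  let st :=
    (PySem.List.pyRange 0 5 1).foldl (fun (st : Int × Int) i =>
      (PySem.List.pyRange 0 5 1).foldl (fun (st : Int × Int) j =>
        let total :=
          (PySem.List.pyRange 0 4 1).foldl (fun (total : Int) direction =>
            let y := j
            let x := i
            let current := pvGet2 new_list j i
            let y := y + (PySem.List.pyGet? dy direction).getD 0
            let x := x + (PySem.List.pyGet? dx direction).getD 0
            if 0 ≤ y ∧ y ≤ 4 ∧ 0 ≤ x ∧ x ≤ 4 then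
              total + |current - pvGet2 new_list y x|
            else total) 0
        let result := st.2 + total
        let max_v := if st.1 < total then total else st.1
        (max_v, result)) st) ((0 : Int), (0 : Int))
  st.2

-- ===== PORT B =====
def cal_abs_alt (new_list : List (List Int)) : Int :=
  let s :=
    (PySem.List.pyRange 0 5 1).foldl (fun (s : Int) j =>
      (PySem.List.pyRange 0 4 1).foldl (fun (s : Int) i =>
        s + |pvGet2 new_list j i - pvGet2 new_list j (i + 1)|
          + |pvGet2 new_list i j - pvGet2 new_list (i + 1) j|) s) 0
  2 * s

-- ===== PRECONDITION & SPEC =====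
-- A indexes new_list[j][i] for all j, i in 0..4: with fewer than 5 rows, or a row among the
-- first 5 shorter than 5, Python raises IndexError; exactly those inputs are excluded.
def Pre_cal_abs (new_list : List (List Int)) : Prop :=
  5 ≤ new_list.length ∧ ∀ r ∈ new_list.take 5, 5 ≤ r.length
instance (new_list : List (List Int)) : Decidable (Pre_cal_abs new_list) := by
  unfold Pre_cal_abs; infer_instance

def pvWitness_cal_abs : List (List Int) :=
  [[1, 2, 3, 4, 5], [5, 4, 3, 2, 1], [0, 0, 0, 0, 0], [7, 1, 7, 1, 7], [2, 2, 2, 2, 2]]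

def Spec_cal_abs (new_list : List (List Int)) (out : Int) : Prop := out = cal_abs_alt new_list
instance (new_list : List (List Int)) (out : Int) : Decidable (Spec_cal_abs new_list out) := by unfold Spec_cal_abs; infer_instance

-- ===== CLAIM (what is proved, stated in full; the proofs are below) =====
def Claim_equal_cal_abs : Prop := ∀ (new_list : List (List Int)), Dom_cal_abs new_list → Pre_cal_abs new_list → Spec_cal_abs new_list (cal_abs new_list)

-- ===== LEMMAS AND PROOFS =====

-- per-cell total of port A (the same text as its innermost direction-fold)
def pvTotal (new_list : List (List Int)) (i j : Int) : Int :=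
  (PySem.List.pyRange 0 4 1).foldl (fun (total : Int) direction =>
    let y := j + (PySem.List.pyGet? [0, 0, -1, 1] direction).getD 0
    let x := i + (PySem.List.pyGet? [-1, 1, 0, 0] direction).getD 0
    if 0 ≤ y ∧ y ≤ 4 ∧ 0 ≤ x ∧ x ≤ 4 then
      total + |pvGet2 new_list j i - pvGet2 new_list y x|
    else total) 0

-- the second state component of A's fold ignores max_v: project it out
lemma pv_foldl_snd {f : Int × Int → Int → Int × Int} (t : Int → Int)
    (h : ∀ st a, (f st a).2 = st.2 + t a) :
    ∀ (l : List Int) (st : Int × Int), (l.foldl f st).2 = st.2 + (l.map t).sum := by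
  intro l
  induction l with
  | nil => simp
  | cons a l ih => intro st; simp only [List.foldl, ih, h, List.map, List.sum_cons]; ring

lemma pv_calA_sum (l : List (List Int)) :
    cal_abs l = ((PySem.List.pyRange 0 5 1).map (fun i =>
      ((PySem.List.pyRange 0 5 1).map (fun j => pvTotal l i j)).sum)).sum := by
  show ((PySem.List.pyRange 0 5 1).foldl _ ((0 : Int), (0 : Int))).2 = _
  rw [pv_foldl_snd (fun i => ((PySem.List.pyRange 0 5 1).map (fun j => pvTotal l i j)).sum)
      (fun st i => pv_foldl_snd (fun j => pvTotal l i j) (fun st j => rfl) _ st)]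
  simp

lemma pv_total_eq (l : List (List Int)) (i j : Int) : pvTotal l i j =
    (((if 0 ≤ j + 0 ∧ j + 0 ≤ 4 ∧ 0 ≤ i + -1 ∧ i + -1 ≤ 4 then
        |pvGet2 l j i - pvGet2 l (j + 0) (i + -1)| else 0)
     + (if 0 ≤ j + 0 ∧ j + 0 ≤ 4 ∧ 0 ≤ i + 1 ∧ i + 1 ≤ 4 then
        |pvGet2 l j i - pvGet2 l (j + 0) (i + 1)| else 0))
     + (if 0 ≤ j + -1 ∧ j + -1 ≤ 4 ∧ 0 ≤ i + 0 ∧ i + 0 ≤ 4 then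
        |pvGet2 l j i - pvGet2 l (j + -1) (i + 0)| else 0))
     + (if 0 ≤ j + 1 ∧ j + 1 ≤ 4 ∧ 0 ≤ i + 0 ∧ i + 0 ≤ 4 then
        |pvGet2 l j i - pvGet2 l (j + 1) (i + 0)| else 0) := by
  simp only [pvTotal, show PySem.List.pyRange 0 4 1 = [0, 1, 2, 3] from by decide, List.foldl,
    show (PySem.List.pyGet? ([0, 0, -1, 1] : List Int) 0).getD 0 = 0 from by decide,
    show (PySem.List.pyGet? ([0, 0, -1, 1] : List Int) 1).getD 0 = 0 from by decide,
    show (PySem.List.pyGet? ([0, 0, -1, 1] : List Int) 2).getD 0 = -1 from by decide,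
    show (PySem.List.pyGet? ([0, 0, -1, 1] : List Int) 3).getD 0 = 1 from by decide,
    show (PySem.List.pyGet? ([-1, 1, 0, 0] : List Int) 0).getD 0 = -1 from by decide,
    show (PySem.List.pyGet? ([-1, 1, 0, 0] : List Int) 1).getD 0 = 1 from by decide,
    show (PySem.List.pyGet? ([-1, 1, 0, 0] : List Int) 2).getD 0 = 0 from by decide,
    show (PySem.List.pyGet? ([-1, 1, 0, 0] : List Int) 3).getD 0 = 0 from by decide]
  split_ifs <;> ring

-- ===== VERDICT (by name: the statement is the Claim_ definition above) =====
set_option maxHeartbeats 2000000 in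
theorem cal_abs_spec : Claim_equal_cal_abs := by
  intro l _ _
  show cal_abs l = cal_abs_alt l
  rw [pv_calA_sum]
  simp only [cal_abs_alt,
    show PySem.List.pyRange 0 5 1 = [0, 1, 2, 3, 4] from by decide,
    show PySem.List.pyRange 0 4 1 = [0, 1, 2, 3] from by decide,
    List.foldl, List.map, List.sum_cons, List.sum_nil]
  simp only [pv_total_eq]
  norm_num
  simp only [abs_sub_comm]
  ring
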